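-- pv_equiv track=rewrite | github.com/nitsud13/rooted-elegance-theme | process_zone_data_complete.py | get_zone_number
-- ===== SOURCE A (Python) =====
-- def get_zone_number(zone_str):
--     """Extract just the number and letter for comparison."""
--     zone = zone_str.strip().lower()
--     num = ""
--     letter = ""
--     for c in zone:
--         if c.isdigit():
--             num += c
--         elif c in 'ab':
--             letter = c
--             break
--     return (int(num) if num else 7, letter or 'a')
-- ===== SOURCE B (Python) =====
-- def get_zone_number(zone_str):
--     """Extract just the number and letter for comparison."""
--     zone = zone_str.strip().lower()
--     idx = next((i for i, c in enumerate(zone) if c in 'ab'), len(zone))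
--     digits = ''.join(c for c in zone[:idx] if c.isdigit())
--     letter = zone[idx] if idx < len(zone) else 'a'
--     return (int(digits) if digits else 7, letter)
-- ===== Notes on version B (the rewrite author's own statement) =====
-- stated objective: idiomatic
-- what changed: A's single loop with accumulators and a break is split into a boundary-find pass (first 'a'/'b' position) followed by a digit-filter over the prefix, with defaults applied once at the end.
import Mathlib
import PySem

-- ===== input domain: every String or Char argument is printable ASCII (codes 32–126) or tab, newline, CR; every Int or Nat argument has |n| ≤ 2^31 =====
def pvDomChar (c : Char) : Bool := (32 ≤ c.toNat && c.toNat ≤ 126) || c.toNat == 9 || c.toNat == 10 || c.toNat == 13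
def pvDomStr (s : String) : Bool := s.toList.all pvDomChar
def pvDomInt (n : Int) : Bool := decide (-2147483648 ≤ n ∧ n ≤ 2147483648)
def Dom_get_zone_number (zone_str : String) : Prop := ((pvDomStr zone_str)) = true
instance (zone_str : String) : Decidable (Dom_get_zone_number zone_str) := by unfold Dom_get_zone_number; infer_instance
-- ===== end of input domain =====

-- B replaces A's single accumulate-with-break loop by a boundary-find pass plus a
-- digit-filter over the prefix (idiomatic decomposition; same cost).

-- ===== PORT A =====
-- A's for-loop with break: accumulates the digit chars, stops at the first 'a'/'b'
-- (strings carried as List Char; `num += c` is the append).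
def pvLoopA : List Char → List Char → String → List Char × String
  | [], num, letter => (num, letter)
  | c :: rest, num, letter =>
    if PySem.Chars.isdigit c then pvLoopA rest (num ++ [c]) letter
    else if c == 'a' || c == 'b' then (num, String.ofList [c])   -- letter = c; break
    else pvLoopA rest num letter

def get_zone_number (zone_str : String) : Int × String :=
  let zone := (PySem.Str.lower (PySem.Str.strip zone_str)).toList
  let r := pvLoopA zone [] ""
  -- int(num): num is a nonempty all-digit string at that branch, so ofChars? is
  -- always `some` (the .getD 0 default is unreachable)
  ((if r.1 = [] then 7 else (PySem.Int.ofChars? r.1).getD 0),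
   if r.2 = "" then "a" else r.2)

-- ===== PORT B =====
def get_zone_number_alt (zone_str : String) : Int × String :=
  let zone := (PySem.Str.lower (PySem.Str.strip zone_str)).toList
  -- next((i for i, c in enumerate(zone) if c in 'ab'), len(zone))
  let idx := zone.findIdx (fun c => c == 'a' || c == 'b')
  -- zone[:idx] with 0 ≤ idx ≤ len(zone) is exactly `take idx`
  let digits := (zone.take idx).filter PySem.Chars.isdigit
  -- zone[idx] if idx < len(zone) else 'a'
  let letter := match zone[idx]? with | some c => String.ofList [c] | none => "a"
  ((if digits = [] then 7 else (PySem.Int.ofChars? digits).getD 0), letter)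

-- ===== PRECONDITION & SPEC =====
def Spec_get_zone_number (zone_str : String) (out : Int × String) : Prop := out = get_zone_number_alt zone_str
instance (zone_str : String) (out : Int × String) : Decidable (Spec_get_zone_number zone_str out) := by unfold Spec_get_zone_number; infer_instance

-- ===== CLAIM (what is proved, stated in full; the proofs are below) =====
def Claim_equal_get_zone_number : Prop := ∀ (zone_str : String), Dom_get_zone_number zone_str → Spec_get_zone_number zone_str (get_zone_number zone_str)

-- ===== LEMMAS AND PROOFS =====

theorem pv_digit_not_ab (c : Char) (h : PySem.Chars.isdigit c = true) :
    (c == 'a' || c == 'b') = false := by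
  by_contra hne
  have hc : (c == 'a' || c == 'b') = true := by
    cases hcc : (c == 'a' || c == 'b') with
    | false => exact absurd hcc hne
    | true => rfl
  simp only [Bool.or_eq_true, beq_iff_eq] at hc
  rcases hc with rfl | rfl <;> exact absurd h (by decide)

theorem pvLoopA_char (l num : List Char) (letter : String) :
    pvLoopA l num letter =
      (num ++ (l.take (l.findIdx (fun c => c == 'a' || c == 'b'))).filter PySem.Chars.isdigit,
       match l[l.findIdx (fun c => c == 'a' || c == 'b')]? with
       | some c => String.ofList [c]
       | none => letter) := by
  induction l generalizing num with
  | nil => simp [pvLoopA]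
  | cons c rest ih =>
    by_cases hd : PySem.Chars.isdigit c = true
    · have hab := pv_digit_not_ab c hd
      simp [pvLoopA, hd, hab, List.findIdx_cons, ih]
    · by_cases hab : (c == 'a' || c == 'b') = true
      · simp [pvLoopA, hd, hab, List.findIdx_cons]
      · simp only [Bool.not_eq_true] at hd hab
        simp [pvLoopA, hd, hab, List.findIdx_cons, ih]

theorem pv_ofList_singleton_ne_empty (c : Char) : String.ofList [c] ≠ "" := by
  intro h
  have h2 := congrArg String.toList h
  rw [String.toList_ofList] at h2
  simp at h2

theorem pv_agree_on_list (zone : List Char) :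
    (let r := pvLoopA zone [] ""
     ((if r.1 = [] then (7 : Int) else (PySem.Int.ofChars? r.1).getD 0),
      if r.2 = "" then "a" else r.2)) =
    (let idx := zone.findIdx (fun c => c == 'a' || c == 'b')
     let digits := (zone.take idx).filter PySem.Chars.isdigit
     let letter := match zone[idx]? with | some c => String.ofList [c] | none => "a"
     ((if digits = [] then (7 : Int) else (PySem.Int.ofChars? digits).getD 0), letter)) := by
  simp only [pvLoopA_char, List.nil_append]
  cases h : zone[zone.findIdx (fun c => c == 'a' || c == 'b')]? with
  | none => simp
  | some c => simp [pv_ofList_singleton_ne_empty c]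

-- ===== VERDICT (by name: the statement is the Claim_ definition above) =====
theorem get_zone_number_spec : Claim_equal_get_zone_number := by
  intro zone_str _
  unfold Spec_get_zone_number get_zone_number get_zone_number_alt
  exact pv_agree_on_list _
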